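-- pv_equiv track=rewrite | github.com/epilectrik/voynich | phases/AZC_constraint_hunting/azc_a_morphology_crosstab.py | decompose_token
-- ===== SOURCE A (Python) =====
-- from typing import Dict, List, Set, Tuple
--
-- KNOWN_PREFIXES = ['qo', 'ol', 'or', 'al', 'ar', 'ok', 'ot', 'ch', 'sh', 'ct', 'd', 's', 'y', 'o', 'a']
--
-- KNOWN_SUFFIXES = ['y', 'dy', 'n', 'in', 'iin', 'aiin', 'l', 'm', 'r', 's', 'g', 'am', 'an', 'ain']
--
-- def decompose_token(token: str) -> Dict[str, str]:
--     """Decompose token into PREFIX, MIDDLE, SUFFIX."""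
--     if not token or len(token) < 2:
--         return {'prefix': '', 'middle': token, 'suffix': ''}
--
--     original = token
--     prefix = ''
--     suffix = ''
--
--     # Extract prefix (longest match first)
--     for p in sorted(KNOWN_PREFIXES, key=len, reverse=True):
--         if token.startswith(p):
--             prefix = p
--             token = token[len(p):]
--             break
--
--     # Extract suffix (longest match first)
--     for s in sorted(KNOWN_SUFFIXES, key=len, reverse=True):
--         if token.endswith(s) and len(token) > len(s):
--             suffix = s
--             token = token[:-len(s)]
--             break
--
--     return {'prefix': prefix, 'middle': token, 'suffix': suffix, 'original': original}
-- ===== SOURCE B (Python) =====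
-- KNOWN_PREFIXES = ['qo', 'ol', 'or', 'al', 'ar', 'ok', 'ot', 'ch', 'sh', 'ct', 'd', 's', 'y', 'o', 'a']
--
-- KNOWN_SUFFIXES = ['y', 'dy', 'n', 'in', 'iin', 'aiin', 'l', 'm', 'r', 's', 'g', 'am', 'an', 'ain']
--
-- _PREFIX_SET = frozenset(KNOWN_PREFIXES)
-- _SUFFIX_SET = frozenset(KNOWN_SUFFIXES)
-- _MAX_P = max(len(p) for p in KNOWN_PREFIXES)
-- _MAX_S = max(len(s) for s in KNOWN_SUFFIXES)
--
--
-- def decompose_token(token: str) -> dict: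
--     """Decompose token into PREFIX, MIDDLE, SUFFIX (set lookup by length)."""
--     if not token or len(token) < 2:
--         return {'prefix': '', 'middle': token, 'suffix': ''}
--
--     prefix = ''
--     rest = token
--     for L in range(_MAX_P, 0, -1):
--         if rest[:L] in _PREFIX_SET:
--             prefix = rest[:L]
--             rest = rest[L:]
--             break
--
--     suffix = ''
--     for L in range(_MAX_S, 0, -1):
--         if len(rest) > L and rest[-L:] in _SUFFIX_SET:
--             suffix = rest[-L:]
--             rest = rest[:-L]
--             break
--
--     return {'prefix': prefix, 'middle': rest, 'suffix': suffix, 'original': token}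
-- ===== Notes on version B (the rewrite author's own statement) =====
-- stated objective: simpler
-- what changed: Replaces A's runtime sort of the affix lists and linear scan over all candidates with two precomputed frozensets plus a loop over candidate lengths from longest to shortest (one set lookup per length).
import Mathlib
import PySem

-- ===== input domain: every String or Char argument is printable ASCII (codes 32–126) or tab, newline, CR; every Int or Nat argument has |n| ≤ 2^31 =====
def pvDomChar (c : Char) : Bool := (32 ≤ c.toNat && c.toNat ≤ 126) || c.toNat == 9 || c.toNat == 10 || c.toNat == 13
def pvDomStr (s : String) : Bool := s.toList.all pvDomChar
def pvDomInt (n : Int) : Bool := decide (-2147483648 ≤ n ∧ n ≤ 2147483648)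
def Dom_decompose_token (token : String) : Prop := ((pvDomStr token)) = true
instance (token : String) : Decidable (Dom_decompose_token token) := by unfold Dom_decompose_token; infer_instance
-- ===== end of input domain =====

-- B replaces A's runtime sort of the affix lists and scan over all candidates with precomputed
-- sets plus a loop over candidate lengths, longest first (objective: simpler).

-- ===== PORT A =====
def KNOWN_PREFIXES : List String :=
  ["qo", "ol", "or", "al", "ar", "ok", "ot", "ch", "sh", "ct", "d", "s", "y", "o", "a"]

def KNOWN_SUFFIXES : List String :=
  ["y", "dy", "n", "in", "iin", "aiin", "l", "m", "r", "s", "g", "am", "an", "ain"]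

-- A's prefix loop: first p (in sorted order) with token.startswith(p); strip it and break.
def aPrefLoop : List String → String → String × String
  | [], tok => ("", tok)
  | p :: ps, tok =>
    if PySem.Str.startswith tok p then
      (p, String.ofList (PySem.List.slice tok.toList (some (PySem.Str.len p)) none))
    else aPrefLoop ps tok

-- A's suffix loop: first s with token.endswith(s) and len(token) > len(s); strip it and break.
def aSufLoop : List String → String → String × String
  | [], tok => ("", tok)
  | s :: ss, tok =>
    if PySem.Str.endswith tok s ∧ PySem.Str.len tok > PySem.Str.len s then
      (s, String.ofList (PySem.List.slice tok.toList none (some (-(PySem.Str.len s)))))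
    else aSufLoop ss tok

def decompose_token (token : String) : List (String × String) :=
  if token = "" ∨ PySem.Str.len token < 2 then
    [("prefix", ""), ("middle", token), ("suffix", "")]
  else
    let original := token
    let pr := aPrefLoop (PySem.List.sorted KNOWN_PREFIXES (fun p => PySem.Str.len p) true) token
    let sr := aSufLoop (PySem.List.sorted KNOWN_SUFFIXES (fun s => PySem.Str.len s) true) pr.2
    [("prefix", pr.1), ("middle", sr.2), ("suffix", sr.1), ("original", original)]

-- ===== PORT B =====
def PREFIX_SET : PySem.Set String := PySem.Set.ofList KNOWN_PREFIXES
def SUFFIX_SET : PySem.Set String := PySem.Set.ofList KNOWN_SUFFIXES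
def MAX_P : Int := (PySem.List.max? (KNOWN_PREFIXES.map (fun p => PySem.Str.len p)) (fun n => n)).getD 0
def MAX_S : Int := (PySem.List.max? (KNOWN_SUFFIXES.map (fun s => PySem.Str.len s)) (fun n => n)).getD 0

-- B's prefix loop: candidate lengths L, longest first; first L with rest[:L] in the set.
def bPrefLoop : List Int → List Char → List Char × List Char
  | [], rest => ([], rest)
  | L :: Ls, rest =>
    if PySem.Set.contains PREFIX_SET (String.ofList (PySem.List.slice rest none (some L))) then
      (PySem.List.slice rest none (some L), PySem.List.slice rest (some L) none)
    else bPrefLoop Ls rest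

-- B's suffix loop: first L with len(rest) > L and rest[-L:] in the set.
def bSufLoop : List Int → List Char → List Char × List Char
  | [], rest => ([], rest)
  | L :: Ls, rest =>
    if (rest.length : Int) > L ∧
        PySem.Set.contains SUFFIX_SET (String.ofList (PySem.List.slice rest (some (-L)) none)) then
      (PySem.List.slice rest (some (-L)) none, PySem.List.slice rest none (some (-L)))
    else bSufLoop Ls rest

def decompose_token_alt (token : String) : List (String × String) :=
  if token = "" ∨ PySem.Str.len token < 2 then
    [("prefix", ""), ("middle", token), ("suffix", "")]
  else
    let pr := bPrefLoop (PySem.List.pyRange MAX_P 0 (-1)) token.toList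
    let sr := bSufLoop (PySem.List.pyRange MAX_S 0 (-1)) pr.2
    [("prefix", String.ofList pr.1), ("middle", String.ofList sr.2),
     ("suffix", String.ofList sr.1), ("original", token)]

-- ===== PRECONDITION & SPEC =====
def Spec_decompose_token (token : String) (out : List (String × String)) : Prop := out = decompose_token_alt token
instance (token : String) (out : List (String × String)) : Decidable (Spec_decompose_token token out) := by unfold Spec_decompose_token; infer_instance

-- ===== CLAIM (what is proved, stated in full; the proofs are below) =====
def Claim_equal_decompose_token : Prop := ∀ (token : String), Dom_decompose_token token → Spec_decompose_token token (decompose_token token)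

-- ===== LEMMAS AND PROOFS =====

-- candidates of a given length, as a filter of the module lists
def pFil (L : Nat) : List String := KNOWN_PREFIXES.filter (fun s => s.toList.length == L)
def sFil (L : Nat) : List String := KNOWN_SUFFIXES.filter (fun s => s.toList.length == L)

lemma mem_len_filter {x : String} {l : List String} {L : Nat} (hx : x.toList.length = L) :
    x ∈ l ↔ x ∈ l.filter (fun s => s.toList.length == L) := by
  have hx' : x.length = L := by simpa using hx
  simp [List.mem_filter, hx']

-- the common normal form of the two prefix loops
def prefRes (cs : List Char) : List Char × List Char :=
  if String.ofList (cs.take 2) ∈ pFil 2 then (cs.take 2, cs.drop 2)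
  else if String.ofList (cs.take 1) ∈ pFil 1 then (cs.take 1, cs.drop 1)
  else ([], cs)

-- the common normal form of the two suffix loops
def sufRes (cs : List Char) : List Char × List Char :=
  if 4 < cs.length ∧ String.ofList (cs.drop (cs.length - 4)) ∈ sFil 4 then
    (cs.drop (cs.length - 4), cs.take (cs.length - 4))
  else if 3 < cs.length ∧ String.ofList (cs.drop (cs.length - 3)) ∈ sFil 3 then
    (cs.drop (cs.length - 3), cs.take (cs.length - 3))
  else if 2 < cs.length ∧ String.ofList (cs.drop (cs.length - 2)) ∈ sFil 2 then
    (cs.drop (cs.length - 2), cs.take (cs.length - 2))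
  else if 1 < cs.length ∧ String.ofList (cs.drop (cs.length - 1)) ∈ sFil 1 then
    (cs.drop (cs.length - 1), cs.take (cs.length - 1))
  else ([], cs)

lemma aPref_cons (p : String) (ps : List String) (tok : String) :
    aPrefLoop (p :: ps) tok =
      if p.toList = tok.toList.take p.toList.length then
        (p, String.ofList (tok.toList.drop p.toList.length))
      else aPrefLoop ps tok := by
  simp only [aPrefLoop, PySem.Str.startswith_eq, PySem.Str.len_eq,
    PySem.List.slice_from_natCast, PySem.Chars.startswith_iff, List.prefix_iff_eq_take]

lemma aSuf_cons (s : String) (ss : List String) (tok : String) (hs : 0 < s.toList.length) :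
    aSufLoop (s :: ss) tok =
      if s.toList = tok.toList.drop (tok.toList.length - s.toList.length) ∧
          s.toList.length < tok.toList.length then
        (s, String.ofList (tok.toList.take (tok.toList.length - s.toList.length)))
      else aSufLoop ss tok := by
  simp only [aSufLoop, PySem.Str.endswith_eq, PySem.Str.len_eq, PySem.Chars.endswith_iff,
    List.suffix_iff_eq_drop, gt_iff_lt, Nat.cast_lt,
    PySem.List.slice_to_neg_natCast tok.toList s.toList.length hs]

-- A's scan over a block of same-length candidates, as one membership test
lemma aPrefBlock (L : Nat) (ps qs : List String) (hL : ∀ p ∈ ps, p.toList.length = L) (tok : String) :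
    aPrefLoop (ps ++ qs) tok =
      if String.ofList (tok.toList.take L) ∈ ps then
        (String.ofList (tok.toList.take L), String.ofList (tok.toList.drop L))
      else aPrefLoop qs tok := by
  induction ps with
  | nil => simp
  | cons p ps ih =>
    have hp : p.toList.length = L := hL p (by simp)
    rw [List.cons_append, aPref_cons, hp]
    by_cases h : p.toList = tok.toList.take L
    · rw [if_pos h, if_pos (by rw [← h]; simp)]
      rw [← h]; simp
    · rw [if_neg h, ih (fun q hq => hL q (by simp [hq]))]
      by_cases h2 : String.ofList (tok.toList.take L) ∈ ps
      · rw [if_pos h2, if_pos (List.mem_cons_of_mem _ h2)]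
      · rw [if_neg h2, if_neg]
        intro hmem
        rcases List.mem_cons.mp hmem with heq | hmem2
        · exact h (by rw [← heq]; simp)
        · exact h2 hmem2

lemma aSufBlock (L : Nat) (ss qs : List String) (hL : ∀ s ∈ ss, s.toList.length = L)
    (hLpos : 0 < L) (tok : String) :
    aSufLoop (ss ++ qs) tok =
      if L < tok.toList.length ∧
          String.ofList (tok.toList.drop (tok.toList.length - L)) ∈ ss then
        (String.ofList (tok.toList.drop (tok.toList.length - L)),
         String.ofList (tok.toList.take (tok.toList.length - L)))
      else aSufLoop qs tok := by
  induction ss with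
  | nil => simp
  | cons s ss ih =>
    have hp : s.toList.length = L := hL s (by simp)
    rw [List.cons_append, aSuf_cons s _ tok (hp ▸ hLpos), hp]
    by_cases h : s.toList = tok.toList.drop (tok.toList.length - L) ∧ L < tok.toList.length
    · rw [if_pos h, if_pos ⟨h.2, by rw [← h.1]; simp⟩]
      rw [← h.1]; simp
    · rw [if_neg h, ih (fun q hq => hL q (by simp [hq]))]
      by_cases h2 : L < tok.toList.length ∧
          String.ofList (tok.toList.drop (tok.toList.length - L)) ∈ ss
      · rw [if_pos h2, if_pos ⟨h2.1, List.mem_cons_of_mem _ h2.2⟩]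
      · rw [if_neg h2, if_neg]
        rintro ⟨hlt, hmem⟩
        rcases List.mem_cons.mp hmem with heq | hmem2
        · exact h ⟨by rw [← heq]; simp, hlt⟩
        · exact h2 ⟨hlt, hmem2⟩

-- membership in the full set, restricted by length
lemma containsP (x : String) (L : Nat) (hx : x.toList.length = L) :
    PySem.Set.contains PREFIX_SET x = true ↔ x ∈ pFil L := by
  rw [pFil, ← mem_len_filter hx]
  simp [PREFIX_SET, PySem.Set.contains, PySem.Set.mem_ofList]

lemma containsS (x : String) (L : Nat) (hx : x.toList.length = L) :
    PySem.Set.contains SUFFIX_SET x = true ↔ x ∈ sFil L := by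
  rw [sFil, ← mem_len_filter hx]
  simp [SUFFIX_SET, PySem.Set.contains, PySem.Set.mem_ofList]

lemma bPref_cons (L : Nat) (hL : L ≤ 2) (Ls : List Int) (cs : List Char) (hcs : 2 ≤ cs.length) :
    bPrefLoop ((L : Int) :: Ls) cs =
      if String.ofList (cs.take L) ∈ pFil L then (cs.take L, cs.drop L)
      else bPrefLoop Ls cs := by
  have hlen : (String.ofList (cs.take L)).toList.length = L := by
    simp; omega
  simp only [bPrefLoop, PySem.List.slice_to_natCast, PySem.List.slice_from_natCast]
  rcases (containsP _ L hlen) with ⟨h1, h2⟩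
  by_cases h : String.ofList (cs.take L) ∈ pFil L
  · rw [if_pos (h2 h), if_pos h]
  · rw [if_neg (fun hb => h (h1 hb)), if_neg h]

lemma bSuf_cons (L : Nat) (hLpos : 0 < L) (Ls : List Int) (cs : List Char) :
    bSufLoop ((L : Int) :: Ls) cs =
      if L < cs.length ∧ String.ofList (cs.drop (cs.length - L)) ∈ sFil L then
        (cs.drop (cs.length - L), cs.take (cs.length - L))
      else bSufLoop Ls cs := by
  simp only [bSufLoop, gt_iff_lt, Nat.cast_lt,
    PySem.List.slice_from_neg_natCast cs L hLpos, PySem.List.slice_to_neg_natCast cs L hLpos]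
  by_cases hlt : L < cs.length
  · have hlen : (String.ofList (cs.drop (cs.length - L))).toList.length = L := by
      simp; omega
    rcases (containsS _ L hlen) with ⟨h1, h2⟩
    by_cases h : String.ofList (cs.drop (cs.length - L)) ∈ sFil L
    · rw [if_pos ⟨hlt, h2 h⟩, if_pos ⟨hlt, h⟩]
    · rw [if_neg (fun hb => h (h1 hb.2)), if_neg (fun hb => h hb.2)]
  · rw [if_neg (fun hb => hlt hb.1), if_neg (fun hb => hlt hb.1)]

-- the sorted candidate lists, arranged in same-length blocks
lemma sortedP_eq :
    PySem.List.sorted KNOWN_PREFIXES (fun p => PySem.Str.len p) true = pFil 2 ++ (pFil 1 ++ []) := by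
  decide

lemma sortedS_eq :
    PySem.List.sorted KNOWN_SUFFIXES (fun s => PySem.Str.len s) true =
      sFil 4 ++ (sFil 3 ++ (sFil 2 ++ (sFil 1 ++ []))) := by
  decide

lemma pFil_len (L : Nat) (p : String) (hp : p ∈ pFil L) : p.toList.length = L := by
  have := (List.mem_filter.mp hp).2; simpa using this

lemma sFil_len (L : Nat) (s : String) (hs : s ∈ sFil L) : s.toList.length = L := by
  have := (List.mem_filter.mp hs).2; simpa using this

lemma prefA (tok : String) :
    aPrefLoop (PySem.List.sorted KNOWN_PREFIXES (fun p => PySem.Str.len p) true) tok =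
      (String.ofList (prefRes tok.toList).1, String.ofList (prefRes tok.toList).2) := by
  rw [sortedP_eq, aPrefBlock 2 _ _ (pFil_len 2) tok, prefRes]
  by_cases h2 : String.ofList (tok.toList.take 2) ∈ pFil 2
  · rw [if_pos h2, if_pos h2]
  · rw [if_neg h2, if_neg h2, aPrefBlock 1 _ _ (pFil_len 1) tok]
    by_cases h1 : String.ofList (tok.toList.take 1) ∈ pFil 1
    · rw [if_pos h1, if_pos h1]
    · rw [if_neg h1, if_neg h1]
      simp [aPrefLoop]

lemma prefB (cs : List Char) (hcs : 2 ≤ cs.length) :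
    bPrefLoop [(2 : Int), (1 : Int)] cs = prefRes cs := by
  have e2 : ((2 : Int) :: [(1 : Int)]) = (((2 : Nat) : Int) :: [(1 : Int)]) := by norm_num
  have e1 : ([(1 : Int)] : List Int) = (((1 : Nat) : Int) :: []) := by norm_num
  rw [e2, bPref_cons 2 (by omega) _ cs hcs, prefRes]
  by_cases h2 : String.ofList (cs.take 2) ∈ pFil 2
  · rw [if_pos h2, if_pos h2]
  · rw [if_neg h2, if_neg h2, e1, bPref_cons 1 (by omega) _ cs hcs]
    by_cases h1 : String.ofList (cs.take 1) ∈ pFil 1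
    · rw [if_pos h1, if_pos h1]
    · rw [if_neg h1, if_neg h1]; rfl

lemma sufA (tok : String) :
    aSufLoop (PySem.List.sorted KNOWN_SUFFIXES (fun s => PySem.Str.len s) true) tok =
      (String.ofList (sufRes tok.toList).1, String.ofList (sufRes tok.toList).2) := by
  rw [sortedS_eq, aSufBlock 4 _ _ (sFil_len 4) (by omega) tok, sufRes]
  by_cases h4 : 4 < tok.toList.length ∧
      String.ofList (tok.toList.drop (tok.toList.length - 4)) ∈ sFil 4
  · rw [if_pos h4, if_pos h4]
  · rw [if_neg h4, if_neg h4, aSufBlock 3 _ _ (sFil_len 3) (by omega) tok]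
    by_cases h3 : 3 < tok.toList.length ∧
        String.ofList (tok.toList.drop (tok.toList.length - 3)) ∈ sFil 3
    · rw [if_pos h3, if_pos h3]
    · rw [if_neg h3, if_neg h3, aSufBlock 2 _ _ (sFil_len 2) (by omega) tok]
      by_cases h2 : 2 < tok.toList.length ∧
          String.ofList (tok.toList.drop (tok.toList.length - 2)) ∈ sFil 2
      · rw [if_pos h2, if_pos h2]
      · rw [if_neg h2, if_neg h2, aSufBlock 1 _ _ (sFil_len 1) (by omega) tok]
        by_cases h1 : 1 < tok.toList.length ∧
            String.ofList (tok.toList.drop (tok.toList.length - 1)) ∈ sFil 1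
        · rw [if_pos h1, if_pos h1]
        · rw [if_neg h1, if_neg h1]
          simp [aSufLoop]

lemma sufB (cs : List Char) :
    bSufLoop [(4 : Int), (3 : Int), (2 : Int), (1 : Int)] cs = sufRes cs := by
  have e4 : ([(4 : Int), 3, 2, 1] : List Int) = (((4 : Nat) : Int) :: [(3 : Int), 2, 1]) := by norm_num
  have e3 : ([(3 : Int), 2, 1] : List Int) = (((3 : Nat) : Int) :: [(2 : Int), 1]) := by norm_num
  have e2 : ([(2 : Int), 1] : List Int) = (((2 : Nat) : Int) :: [(1 : Int)]) := by norm_num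
  have e1 : ([(1 : Int)] : List Int) = (((1 : Nat) : Int) :: []) := by norm_num
  rw [e4, bSuf_cons 4 (by omega) _ cs, sufRes]
  by_cases h4 : 4 < cs.length ∧ String.ofList (cs.drop (cs.length - 4)) ∈ sFil 4
  · rw [if_pos h4, if_pos h4]
  · rw [if_neg h4, if_neg h4, e3, bSuf_cons 3 (by omega) _ cs]
    by_cases h3 : 3 < cs.length ∧ String.ofList (cs.drop (cs.length - 3)) ∈ sFil 3
    · rw [if_pos h3, if_pos h3]
    · rw [if_neg h3, if_neg h3, e2, bSuf_cons 2 (by omega) _ cs]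
      by_cases h2 : 2 < cs.length ∧ String.ofList (cs.drop (cs.length - 2)) ∈ sFil 2
      · rw [if_pos h2, if_pos h2]
      · rw [if_neg h2, if_neg h2, e1, bSuf_cons 1 (by omega) _ cs]
        by_cases h1 : 1 < cs.length ∧ String.ofList (cs.drop (cs.length - 1)) ∈ sFil 1
        · rw [if_pos h1, if_pos h1]
        · rw [if_neg h1, if_neg h1]; rfl

lemma rangeP_eq : PySem.List.pyRange MAX_P 0 (-1) = [(2 : Int), 1] := by decide
lemma rangeS_eq : PySem.List.pyRange MAX_S 0 (-1) = [(4 : Int), 3, 2, 1] := by decide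

-- ===== VERDICT (by name: the statement is the Claim_ definition above) =====
theorem decompose_token_spec : Claim_equal_decompose_token := by
  intro token _
  show decompose_token token = decompose_token_alt token
  unfold decompose_token decompose_token_alt
  by_cases h : token = "" ∨ PySem.Str.len token < 2
  · rw [if_pos h, if_pos h]
  · rw [if_neg h, if_neg h]
    show [("prefix", (aPrefLoop (PySem.List.sorted KNOWN_PREFIXES (fun p => PySem.Str.len p) true) token).1),
          ("middle", (aSufLoop (PySem.List.sorted KNOWN_SUFFIXES (fun s => PySem.Str.len s) true)
              (aPrefLoop (PySem.List.sorted KNOWN_PREFIXES (fun p => PySem.Str.len p) true) token).2).2),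
          ("suffix", (aSufLoop (PySem.List.sorted KNOWN_SUFFIXES (fun s => PySem.Str.len s) true)
              (aPrefLoop (PySem.List.sorted KNOWN_PREFIXES (fun p => PySem.Str.len p) true) token).2).1),
          ("original", token)] =
        [("prefix", String.ofList (bPrefLoop (PySem.List.pyRange MAX_P 0 (-1)) token.toList).1),
         ("middle", String.ofList (bSufLoop (PySem.List.pyRange MAX_S 0 (-1))
             (bPrefLoop (PySem.List.pyRange MAX_P 0 (-1)) token.toList).2).2),
         ("suffix", String.ofList (bSufLoop (PySem.List.pyRange MAX_S 0 (-1))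
             (bPrefLoop (PySem.List.pyRange MAX_P 0 (-1)) token.toList).2).1),
         ("original", token)]
    have hlen : 2 ≤ token.toList.length := by
      rcases not_or.mp h with ⟨-, h2⟩
      rw [PySem.Str.len_eq, not_lt] at h2
      omega
    rw [rangeP_eq, rangeS_eq, sufA, sufB, prefA token, prefB token.toList hlen]
    simp
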